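-- pv_equiv track=rewrite | github.com/saequus/learn-python-favorites | Tasks/MCCMETasksAndSolutions.py | count_smiles
-- ===== SOURCE A (Python) =====
-- def count_smiles(s: str) -> int:
--     """ Counts smiles in a string.
--     Smiles are: ':' with any number of '-' and any number of '[' or ']'
--     or '(' or ')' after it.
--     :param s: str with text and smiles
--     :return: int number of smiles
--     """
--     result, i = 0, 0
--     while i < len(s) - 1:
--         if s[i] == ';' or s[i] == ':':
--             i += 1
--             while s[i] == '-' and i < len(s) - 1:
--                 i += 1
--             if s[i] == '[' or s[i] == ']' or s[i] == '(' or s[i] == ')':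
--                 result += 1
--         else:
--             i += 1
--     return result
-- ===== SOURCE B (Python) =====
-- def count_smiles(s: str) -> int:
--     """Single forward pass with a one-bit state: 'pending' means we are inside
--     a potential smiley (saw ':' or ';' followed only by '-' so far)."""
--     result = 0
--     pending = False
--     for c in s:
--         if pending and c in '[]()':
--             result += 1
--             pending = False
--         elif c in ':;':
--             pending = True
--         elif pending and c == '-':
--             pass
--         else:
--             pending = False
--     return result
-- ===== Notes on version B (the rewrite author's own statement) =====
-- stated objective: simpler
-- what changed: Replaced the index-based while loop with a nested dash-consuming inner loop and re-examined stop positions by a single forward for-each pass over the characters maintaining one boolean state flag.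
import Mathlib
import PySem

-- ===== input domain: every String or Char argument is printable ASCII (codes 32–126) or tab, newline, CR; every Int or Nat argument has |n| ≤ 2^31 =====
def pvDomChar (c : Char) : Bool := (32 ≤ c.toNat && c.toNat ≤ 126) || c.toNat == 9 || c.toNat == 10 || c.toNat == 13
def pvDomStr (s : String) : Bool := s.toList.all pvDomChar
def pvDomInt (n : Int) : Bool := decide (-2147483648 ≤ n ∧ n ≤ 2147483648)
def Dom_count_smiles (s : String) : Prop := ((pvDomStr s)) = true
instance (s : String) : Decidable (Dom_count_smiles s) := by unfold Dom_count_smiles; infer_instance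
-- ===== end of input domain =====

-- B replaces A's index-based while loop (with an inner dash-consuming loop) by a single
-- forward pass over the characters with one boolean state flag; objective: simpler (and measurably faster in CPython).

-- ===== PORT A =====
-- Inner `while s[i] == '-' and i < len(s)-1: i += 1` loop of A.
-- In every reachable state i < len(s), so `getD i ' '` is exactly Python's s[i] here.
def dashLoopA (cs : List Char) (i : Nat) : Nat :=
  if h : cs.getD i ' ' = '-' ∧ i < cs.length - 1 then dashLoopA cs (i + 1) else i
termination_by cs.length - i
decreasing_by omega

-- termination lemma the port cites in its decreasing_by
theorem dashLoopA_ge (cs : List Char) (i : Nat) : i ≤ dashLoopA cs i := by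
  fun_induction dashLoopA cs i with
  | case1 i h ih => omega
  | case2 i h => omega

-- Outer `while i < len(s)-1` loop of A, carrying `result` in r.
def loopA (cs : List Char) (i : Nat) (r : Int) : Int :=
  if h : i < cs.length - 1 then
    if cs.getD i ' ' = ';' ∨ cs.getD i ' ' = ':' then
      let j := dashLoopA cs (i + 1)
      loopA cs j
        (if cs.getD j ' ' = '[' ∨ cs.getD j ' ' = ']' ∨ cs.getD j ' ' = '(' ∨ cs.getD j ' ' = ')'
         then r + 1 else r)
    else loopA cs (i + 1) r
  else r
termination_by cs.length - i
decreasing_by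
  · have : i + 1 ≤ dashLoopA cs (i + 1) := dashLoopA_ge cs (i + 1)
    omega
  · omega

def count_smiles (s : String) : Int := loopA s.toList 0 0

-- ===== PORT B =====
-- One step of B's for-loop: state is (result, pending).
def stepB (st : Int × Bool) (c : Char) : Int × Bool :=
  if st.2 && (c == '[' || c == ']' || c == '(' || c == ')') then (st.1 + 1, false)
  else if c == ':' || c == ';' then (st.1, true)
  else if st.2 && (c == '-') then (st.1, true)
  else (st.1, false)

def count_smiles_alt (s : String) : Int := (s.toList.foldl stepB (0, false)).1

-- ===== PRECONDITION & SPEC =====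
def Spec_count_smiles (s : String) (out : Int) : Prop := out = count_smiles_alt s
instance (s : String) (out : Int) : Decidable (Spec_count_smiles s out) := by unfold Spec_count_smiles; infer_instance

-- ===== CLAIM (what is proved, stated in full; the proofs are below) =====
def Claim_equal_count_smiles : Prop := ∀ (s : String), Dom_count_smiles s → Spec_count_smiles s (count_smiles s)

-- ===== LEMMAS AND PROOFS =====

theorem dashLoopA_le (cs : List Char) (i : Nat) (h : i ≤ cs.length - 1) :
    dashLoopA cs i ≤ cs.length - 1 := by
  fun_induction dashLoopA cs i with
  | case1 i h' ih => exact ih (by omega)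
  | case2 i h' => omega

theorem dashLoopA_stop (cs : List Char) (i : Nat) :
    ¬ (cs.getD (dashLoopA cs i) ' ' = '-' ∧ dashLoopA cs i < cs.length - 1) := by
  fun_induction dashLoopA cs i with
  | case1 i h' ih => exact ih
  | case2 i h' => exact h'

theorem stepB_fst_false (c : Char) : (stepB (0, false) c).1 = 0 := by
  simp only [stepB]
  split_ifs <;> simp_all

theorem stepB_add (a k : Int) (p : Bool) (c : Char) :
    stepB (a + k, p) c = ((stepB (a, p) c).1 + k, (stepB (a, p) c).2) := by
  simp only [stepB]
  split_ifs <;> simp [add_right_comm]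

theorem foldB_add (l : List Char) (a k : Int) (p : Bool) :
    (List.foldl stepB (a + k, p) l).1 = (List.foldl stepB (a, p) l).1 + k := by
  induction l generalizing a p with
  | nil => simp
  | cons c t ih =>
    simp only [List.foldl, stepB_add]
    rw [ih]

theorem foldB_shift (l : List Char) (a : Int) (p : Bool) :
    (List.foldl stepB (a, p) l).1 = a + (List.foldl stepB (0, p) l).1 := by
  have h := foldB_add l 0 a p
  simp only [zero_add] at h
  omega

theorem dash_fold (cs : List Char) (i : Nat) (a : Int) :
    (List.foldl stepB (a, true) (cs.drop i)).1
      = (List.foldl stepB (a, true) (cs.drop (dashLoopA cs i))).1 := by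
  fun_induction dashLoopA cs i with
  | case1 i h ih =>
    have hi : i < cs.length := by omega
    rw [List.drop_eq_getElem_cons hi]
    rw [List.getD_eq_getElem cs ' ' hi] at h
    simp only [List.foldl, stepB, h.1]
    simpa using ih
  | case2 i h => rfl

theorem loopA_eq (cs : List Char) (i : Nat) (r : Int) :
    loopA cs i r = r + (List.foldl stepB (0, false) (cs.drop i)).1 := by
  fun_induction loopA cs i r with
  | case1 i r h hc j ih =>
    -- trigger case: cs[i] is ';' or ':'
    have hi : i < cs.length := by omega
    rw [List.drop_eq_getElem_cons hi]
    rw [List.getD_eq_getElem cs ' ' hi] at hc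
    have hstep : stepB ((0 : Int), false) cs[i] = (0, true) := by
      rcases hc with h' | h' <;> simp [stepB, h']
    simp only [List.foldl, hstep]
    rw [dash_fold]
    have hj : j = dashLoopA cs (i + 1) := rfl
    have hj1 : i + 1 ≤ j := dashLoopA_ge cs (i + 1)
    have hj2 : j ≤ cs.length - 1 := dashLoopA_le cs (i + 1) (by omega)
    have hjlt : j < cs.length := by omega
    have hstop := dashLoopA_stop cs (i + 1)
    rw [← hj] at hstop
    have hgd : cs.getD j ' ' = cs[j] := List.getD_eq_getElem cs ' ' hjlt
    rw [← hj, List.drop_eq_getElem_cons hjlt]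
    simp only [List.foldl]
    by_cases hbr : cs.getD j ' ' = '[' ∨ cs.getD j ' ' = ']' ∨ cs.getD j ' ' = '(' ∨ cs.getD j ' ' = ')'
    · -- bracket at j: both sides count one
      rw [dif_pos hbr] at ih
      rw [if_pos hbr]
      rw [hgd] at hbr
      have hb : stepB ((0 : Int), true) cs[j] = (1, false) := by
        rcases hbr with h' | h' | h' | h' <;> simp [stepB, h']
      have hb0 : stepB ((0 : Int), false) cs[j] = (0, false) := by
        rcases hbr with h' | h' | h' | h' <;> simp [stepB, h']
      rw [hb, ih, List.drop_eq_getElem_cons hjlt]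
      simp only [List.foldl, hb0]
      rw [foldB_shift _ 1 false]
      omega
    · -- no bracket at j: no count, the fold state beyond j agrees for both pendings
      rw [dif_neg hbr] at ih
      rw [if_neg hbr]
      rw [hgd] at hbr
      simp only [not_or] at hbr
      obtain ⟨n1, n2, n3, n4⟩ := hbr
      by_cases hcolon : cs[j] = ':' ∨ cs[j] = ';'
      · have e1 : stepB ((0 : Int), true) cs[j] = (0, true) := by
          rcases hcolon with h' | h' <;> simp [stepB, h']
        have e0 : stepB ((0 : Int), false) cs[j] = (0, true) := by
          rcases hcolon with h' | h' <;> simp [stepB, h']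
        rw [e1, ih, List.drop_eq_getElem_cons hjlt]
        simp only [List.foldl, e0]
      · simp only [not_or] at hcolon
        obtain ⟨m1, m2⟩ := hcolon
        by_cases hdash : cs[j] = '-'
        · -- a dash at j forces j = len-1 (A's inner loop stopped at the last index)
          have hjlast : j = cs.length - 1 := by
            rw [hgd, hdash] at hstop
            simp at hstop
            omega
          have hnil : cs.drop (j + 1) = [] := List.drop_eq_nil_of_le (by omega)
          rw [hnil, ih, List.drop_eq_getElem_cons hjlt, hnil]
          simp [stepB, hdash]
        · have e1 : stepB ((0 : Int), true) cs[j] = (0, false) := by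
            simp [stepB, n1, n2, n3, n4, m1, m2, hdash]
          have e0 : stepB ((0 : Int), false) cs[j] = (0, false) := by
            simp [stepB, m1, m2]
          rw [e1, ih, List.drop_eq_getElem_cons hjlt]
          simp only [List.foldl, e0]
  | case2 i r h hc ih =>
    -- non-trigger character at i
    have hi : i < cs.length := by omega
    rw [List.drop_eq_getElem_cons hi]
    rw [List.getD_eq_getElem cs ' ' hi] at hc
    simp only [not_or] at hc
    have e0 : stepB ((0 : Int), false) cs[i] = (0, false) := by
      simp [stepB, hc.1, hc.2]
    simp only [List.foldl, e0]
    exact ih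
  | case3 i r h =>
    -- loop exit: at most one character remains, which cannot count with pending = false
    by_cases hi : i < cs.length
    · rw [List.drop_eq_getElem_cons hi]
      have hnil : cs.drop (i + 1) = [] := List.drop_eq_nil_of_le (by omega)
      rw [hnil]
      simp only [List.foldl]
      rw [stepB_fst_false]
      omega
    · rw [List.drop_eq_nil_of_le (by omega)]
      simp

theorem count_smiles_spec : Claim_equal_count_smiles := by
  intro s _
  unfold Spec_count_smiles count_smiles count_smiles_alt
  rw [loopA_eq]
  simp
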